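-- pv_equiv track=rewrite | github.com/HaniRiguene/Projet_Lamih | Serveur_Client/server_main_program.py | check_if_right_topic
-- ===== SOURCE A (Python) =====
-- def check_if_right_topic(topic, goodTopic):
--     topic_split=topic.split("/")
--     goodTopic_split=goodTopic.split("/")
--     if len(topic_split)==len(goodTopic_split):
--         for i in range(len(topic_split)):
--             if topic_split[i]==goodTopic_split[i] or goodTopic_split[i]=="*":
--                 if i==len(topic_split)-1:
--                     return True
--                 else:
--                     continue
--             else:
--                 break
--     return False
-- ===== SOURCE B (Python) =====
-- def check_if_right_topic(topic, goodTopic):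
--     # Walk both strings segment by segment via str.partition, no list building.
--     while True:
--         t_head, t_sep, topic = topic.partition("/")
--         g_head, g_sep, goodTopic = goodTopic.partition("/")
--         if bool(t_sep) != bool(g_sep):
--             return False
--         if g_head != "*" and t_head != g_head:
--             return False
--         if not t_sep:
--             return True
-- ===== Notes on version B (the rewrite author's own statement) =====
-- stated objective: alternative
-- what changed: B replaces A's build-both-split-lists-then-index-loop-with-break with a single streaming pass that peels one segment at a time from both strings via str.partition, never materialising the segment lists.
import Mathlib
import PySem

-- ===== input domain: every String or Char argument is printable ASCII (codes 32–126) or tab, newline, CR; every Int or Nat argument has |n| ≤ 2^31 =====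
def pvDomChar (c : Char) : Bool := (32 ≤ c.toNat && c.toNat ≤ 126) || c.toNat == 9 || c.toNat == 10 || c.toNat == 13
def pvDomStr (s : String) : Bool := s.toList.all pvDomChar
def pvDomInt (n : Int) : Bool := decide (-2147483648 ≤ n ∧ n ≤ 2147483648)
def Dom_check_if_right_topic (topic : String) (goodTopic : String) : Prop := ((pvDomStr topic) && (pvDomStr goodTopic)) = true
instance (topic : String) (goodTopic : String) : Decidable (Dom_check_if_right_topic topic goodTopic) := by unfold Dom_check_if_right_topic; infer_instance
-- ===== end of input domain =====

-- B scans both topics one '/'-separated segment at a time (str.partition) instead of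
-- building both split lists and looping over indices with break, as A does; same cost, streaming decomposition.

-- ===== PORT A =====
-- A's for-loop over range(len(topic_split)) with continue/break/early return, index by index
def pvALoop (ts gs : List (List Char)) (n i : Nat) : Bool :=
  if _h : i < n then
    if ts.getD i [] == gs.getD i [] || gs.getD i [] == ['*'] then
      if i = n - 1 then true else pvALoop ts gs n (i + 1)
    else false
  else false
termination_by n - i

def check_if_right_topic (topic : String) (goodTopic : String) : Bool :=
  let topic_split := PySem.Chars.splitOn topic.toList ['/']
  let goodTopic_split := PySem.Chars.splitOn goodTopic.toList ['/']
  if topic_split.length = goodTopic_split.length then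
    pvALoop topic_split goodTopic_split topic_split.length 0
  else false

-- ===== PORT B =====
-- hand port of Python's s.partition("/") for the one-char separator "/": exact
-- (head before first '/', flag = separator found, rest after it)
def pvPartitionSlash : List Char → List Char × Bool × List Char
  | [] => ([], false, [])
  | c :: rest =>
    if c = '/' then ([], true, rest)
    else
      let (h, f, r) := pvPartitionSlash rest
      (c :: h, f, r)

-- termination of the B loop: when a '/' was found the rest is strictly shorter
theorem pvPartitionSlash_rest_lt (s : List Char) (h : (pvPartitionSlash s).2.1 = true) :
    (pvPartitionSlash s).2.2.length < s.length := by
  induction s with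
  | nil => simp [pvPartitionSlash] at h
  | cons c rest ih =>
    by_cases hc : c = '/'
    · simp [pvPartitionSlash, hc]
    · simp only [pvPartitionSlash, if_neg hc] at h ⊢
      have := ih
      cases hp : pvPartitionSlash rest with
      | mk h1 p2 =>
        simp [hp] at h ⊢
        have := ih (by simp [hp, h])
        simp [hp] at this
        omega

-- B's while-loop: peel one segment from each side per iteration
def pvBGo (t g : List Char) : Bool :=
  let pt := pvPartitionSlash t
  let pg := pvPartitionSlash g
  if pt.2.1 ≠ pg.2.1 then false
  else if pg.1 ≠ ['*'] ∧ pt.1 ≠ pg.1 then false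
  else if hpt : pt.2.1 = false then true  -- the no-separator case ends the loop
  else pvBGo pt.2.2 pg.2.2
termination_by t.length
decreasing_by
  exact pvPartitionSlash_rest_lt t (by simpa using hpt)

def check_if_right_topic_alt (topic : String) (goodTopic : String) : Bool :=
  pvBGo topic.toList goodTopic.toList

-- ===== PRECONDITION & SPEC =====
def Spec_check_if_right_topic (topic : String) (goodTopic : String) (out : Bool) : Prop := out = check_if_right_topic_alt topic goodTopic
instance (topic : String) (goodTopic : String) (out : Bool) : Decidable (Spec_check_if_right_topic topic goodTopic out) := by unfold Spec_check_if_right_topic; infer_instance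

-- ===== CLAIM (what is proved, stated in full; the proofs are below) =====
def Claim_equal_check_if_right_topic : Prop := ∀ (topic : String) (goodTopic : String), Dom_check_if_right_topic topic goodTopic → Spec_check_if_right_topic topic goodTopic (check_if_right_topic topic goodTopic)

-- ===== LEMMAS AND PROOFS =====

-- common reference predicate: segment lists match pairwise, last segment accepts
def pvChk : List (List Char) → List (List Char) → Bool
  | [t], [g] => (t == g || g == ['*'])
  | t :: ts, g :: gs => (t == g || g == ['*']) && pvChk ts gs
  | _, _ => false

-- reference split: structural split on '/'
def pvSplit : List Char → List (List Char)
  | [] => [[]]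
  | c :: rest =>
    if c = '/' then [] :: pvSplit rest
    else
      match pvSplit rest with
      | [] => [[c]]
      | h :: t => (c :: h) :: t

theorem pvSplit_ne_nil (s : List Char) : pvSplit s ≠ [] := by
  cases s with
  | nil => simp [pvSplit]
  | cons c rest =>
    simp only [pvSplit]
    split <;> simp_all
    split <;> simp

-- splitOn.go step equations for the one-char separator '/'
theorem pvGo_nil (f : Nat) (cur : List Char) (acc : List (List Char)) :
    PySem.Chars.splitOn.go ['/'] f [] cur acc = (cur.reverse :: acc).reverse := by
  cases f <;> (rw [PySem.Chars.splitOn.go]; simp)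

theorem pvGo_slash (f : Nat) (rest cur : List Char) (acc : List (List Char)) :
    PySem.Chars.splitOn.go ['/'] (f+1) ('/' :: rest) cur acc
      = PySem.Chars.splitOn.go ['/'] f rest [] (cur.reverse :: acc) := by
  rw [PySem.Chars.splitOn.go]
  simp [List.isPrefixOf]

theorem pvGo_other (f : Nat) (c : Char) (hc : c ≠ '/') (rest cur : List Char) (acc : List (List Char)) :
    PySem.Chars.splitOn.go ['/'] (f+1) (c :: rest) cur acc
      = PySem.Chars.splitOn.go ['/'] f rest (c :: cur) acc := by
  rw [PySem.Chars.splitOn.go]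
  simp [List.isPrefixOf, Ne.symm hc]

-- prepend onto the head segment (describes splitOn.go's 'cur' accumulator)
def pvConsHead (x : List Char) : List (List Char) → List (List Char)
  | [] => [x]
  | h :: t => (x ++ h) :: t

theorem pvGo_eq (fuel : Nat) : ∀ (s cur : List Char) (acc : List (List Char)),
    s.length ≤ fuel →
    PySem.Chars.splitOn.go ['/'] fuel s cur acc = acc.reverse ++ pvConsHead cur.reverse (pvSplit s) := by
  induction fuel with
  | zero =>
    intro s cur acc hs
    have hnil : s = [] := by cases s <;> simp_all
    subst hnil
    simp [pvGo_nil, pvSplit, pvConsHead]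
  | succ f ih =>
    intro s cur acc hs
    cases s with
    | nil => simp [pvGo_nil, pvSplit, pvConsHead]
    | cons c rest =>
      simp only [List.length_cons, Nat.add_le_add_iff_right] at hs
      by_cases hc : c = '/'
      · subst hc
        rw [pvGo_slash, ih rest [] _ hs]
        rcases hr : pvSplit rest with _ | ⟨h, t⟩
        · exact absurd hr (pvSplit_ne_nil rest)
        · simp [pvSplit, hr, pvConsHead]
      · rw [pvGo_other f c hc, ih rest (c :: cur) acc hs]
        rcases hr : pvSplit rest with _ | ⟨h, t⟩
        · exact absurd hr (pvSplit_ne_nil rest)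
        · simp [pvSplit, hc, hr, pvConsHead]

theorem pvSplitOn_eq (s : List Char) : PySem.Chars.splitOn s ['/'] = pvSplit s := by
  rw [PySem.Chars.splitOn, pvGo_eq (s.length + 1) s [] [] (by omega)]
  rcases hr : pvSplit s with _ | ⟨h, t⟩
  · exact absurd hr (pvSplit_ne_nil s)
  · simp [pvConsHead]

-- the A-side index loop computes the pairwise check on the dropped suffixes
theorem pvALoop_eq (ts gs : List (List Char)) (hl : ts.length = gs.length) (i : Nat) :
    pvALoop ts gs ts.length i = pvChk (List.drop i ts) (List.drop i gs) := by
  by_cases h : i < ts.length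
  · have hg : i < gs.length := hl ▸ h
    have hts : List.drop i ts = ts[i] :: List.drop (i+1) ts := List.drop_eq_getElem_cons h
    have hgs : List.drop i gs = gs[i] :: List.drop (i+1) gs := List.drop_eq_getElem_cons hg
    rw [pvALoop]
    simp only [h, dif_pos, List.getD_eq_getElem?_getD, List.getElem?_eq_getElem h,
      List.getElem?_eq_getElem hg, Option.getD_some]
    by_cases hm : (ts[i] == gs[i] || gs[i] == ['*']) = true
    · simp only [hm, if_true]
      by_cases hlast : i = ts.length - 1
      · have ht2 : List.drop (i+1) ts = [] := List.drop_eq_nil_of_le (by omega)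
        have hg2 : List.drop (i+1) gs = [] := List.drop_eq_nil_of_le (by omega)
        rw [hts, hgs, ht2, hg2, if_pos hlast]
        simpa [pvChk] using hm
      · have hi1 : i + 1 < ts.length := by omega
        have ht2 : List.drop (i+1) ts ≠ [] := by
          simp only [ne_eq, List.drop_eq_nil_iff]; omega
        have hg2 : List.drop (i+1) gs ≠ [] := by
          simp only [ne_eq, List.drop_eq_nil_iff]; omega
        rw [if_neg hlast, pvALoop_eq ts gs hl (i+1), hts, hgs]
        rcases h1 : List.drop (i+1) ts with _ | ⟨a, as⟩
        · exact absurd h1 ht2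
        · rcases h2 : List.drop (i+1) gs with _ | ⟨b, bs⟩
          · exact absurd h2 hg2
          · simp [pvChk, hm]
    · simp only [hm]
      rw [hts, hgs]
      rcases h1 : List.drop (i+1) ts with _ | ⟨a, as⟩ <;>
        rcases h2 : List.drop (i+1) gs with _ | ⟨b, bs⟩ <;>
          simp_all [pvChk]
  · have h1 : List.drop i ts = [] := List.drop_eq_nil_of_le (by omega)
    have h2 : List.drop i gs = [] := List.drop_eq_nil_of_le (by omega)
    rw [pvALoop, h1, h2]
    simp [h, pvChk]
termination_by ts.length - i

theorem pvChk_of_length_ne : ∀ (ts gs : List (List Char)), ts.length ≠ gs.length → pvChk ts gs = false := by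
  intro ts
  induction ts with
  | nil => intro gs h; cases gs <;> simp_all [pvChk]
  | cons t ts ih =>
    intro gs h
    cases gs with
    | nil => simp [pvChk]
    | cons g gs =>
      cases ts with
      | nil =>
        cases gs with
        | nil => simp at h
        | cons b bs => simp [pvChk]
      | cons a as =>
        cases gs with
        | nil => simp [pvChk]
        | cons b bs =>
          have := ih (b :: bs) (by simp_all)
          simp only [pvChk]
          rw [this, Bool.and_false]

-- pvSplit in terms of one partition step
theorem pvSplit_partition (s : List Char) :
    pvSplit s = if (pvPartitionSlash s).2.1 then
        (pvPartitionSlash s).1 :: pvSplit (pvPartitionSlash s).2.2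
      else [(pvPartitionSlash s).1] := by
  induction s with
  | nil => simp [pvSplit, pvPartitionSlash]
  | cons c rest ih =>
    by_cases hc : c = '/'
    · simp [pvSplit, pvPartitionSlash, hc]
    · simp only [pvSplit, pvPartitionSlash, if_neg hc]
      rcases hp : pvPartitionSlash rest with ⟨h, f, r⟩
      rw [hp] at ih
      cases f <;> simp_all

-- the B loop computes the pairwise check on the structural splits
theorem pvBGo_eq (t g : List Char) : pvBGo t g = pvChk (pvSplit t) (pvSplit g) := by
  rw [pvBGo, pvSplit_partition t, pvSplit_partition g]
  rcases hpt : pvPartitionSlash t with ⟨th, tf, tr⟩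
  rcases hpg : pvPartitionSlash g with ⟨gh, gf, gr⟩
  by_cases hf : tf = gf
  · subst hf
    cases tf with
    | false =>
      by_cases hm : gh ≠ ['*'] ∧ th ≠ gh
      · simp [pvChk, hm]
      · rw [if_neg (by simp), if_neg hm, dif_pos rfl]
        simp only [not_and, not_not, ne_eq] at hm
        by_cases h1 : gh = ['*']
        · simp [pvChk, h1]
        · simp [pvChk, hm h1]
    | true =>
      have hrec := pvBGo_eq tr gr
      rcases hs1 : pvSplit tr with _ | ⟨a, as⟩
      · exact absurd hs1 (pvSplit_ne_nil tr)
      rcases hs2 : pvSplit gr with _ | ⟨b, bs⟩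
      · exact absurd hs2 (pvSplit_ne_nil gr)
      by_cases hm : gh ≠ ['*'] ∧ th ≠ gh
      · simp [pvChk, hm]
      · rw [if_neg (by simp), if_neg hm, dif_neg (by simp)]
        simp only [not_and, not_not, ne_eq] at hm
        have hd : (th == gh || gh == ['*']) = true := by
          by_cases h1 : gh = ['*']
          · simp [h1]
          · simp [hm h1]
        rw [hrec, hs1, hs2]
        simp [pvChk, hd]
  · rw [if_pos (by simpa using hf)]
    cases tf <;> cases gf
    · exact absurd rfl hf
    · rcases hs2 : pvSplit gr with _ | ⟨b, bs⟩
      · exact absurd hs2 (pvSplit_ne_nil gr)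
      · simp [pvChk]
    · rcases hs1 : pvSplit tr with _ | ⟨a, as⟩
      · exact absurd hs1 (pvSplit_ne_nil tr)
      · simp [pvChk]
    · exact absurd rfl hf
termination_by t.length
decreasing_by
  have h := pvPartitionSlash_rest_lt t (by rw [hpt])
  rw [hpt] at h
  exact h

-- ===== VERDICT (by name: the statement is the Claim_ definition above) =====
theorem check_if_right_topic_spec : Claim_equal_check_if_right_topic := by
  intro topic goodTopic _
  unfold Spec_check_if_right_topic check_if_right_topic check_if_right_topic_alt
  simp only [pvSplitOn_eq, pvBGo_eq]
  by_cases hl : (pvSplit topic.toList).length = (pvSplit goodTopic.toList).length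
  · rw [if_pos hl, pvALoop_eq _ _ hl 0, List.drop_zero, List.drop_zero]
  · rw [if_neg hl, pvChk_of_length_ne _ _ hl]
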